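-- pv_equiv track=rewrite | github.com/taylorjg/classic_problems_python | aoc/2019/Day12/main.py | find_cycle_periods
-- ===== SOURCE A (Python) =====
-- from itertools import combinations, count
--
-- class Vector:
--     def __init__(self, x, y, z):
--         self.x = x
--         self.y = y
--         self.z = z
--
--     def energy(self):
--         vs = [self.x, self.y, self.z]
--         return sum([abs(v) for v in vs])
--
--     def __getitem__(self, item):
--         if item == "x": return self.x
--         if item == "y": return self.y
--         if item == "z": return self.z
--         raise TypeError(f"[Vector] unknown item {item}.")
--
--     def __str__(self):
--         return f"<x={pad(self.x)}, y={pad(self.y)}, z={pad(self.z)}>"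
--
-- class Moon:
--     def __init__(self, pos, vel):
--         self.pos = pos
--         self.vel = vel
--
--     def energy(self):
--         return self.pos.energy() * self.vel.energy()
--
--     def __str__(self):
--         return f"pos={str(self.pos)}, vel={str(self.vel)}"
--
-- def apply_gravity_to_pair(moon1, moon2):
--     def calc_pull(a, b):
--         if b > a: return +1
--         if a > b: return -1
--         return 0
--
--     pull_x = calc_pull(moon1.pos.x, moon2.pos.x)
--     pull_y = calc_pull(moon1.pos.y, moon2.pos.y)
--     pull_z = calc_pull(moon1.pos.z, moon2.pos.z)
--
--     moon1.vel.x += pull_x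
--     moon1.vel.y += pull_y
--     moon1.vel.z += pull_z
--
--     moon2.vel.x += -pull_x
--     moon2.vel.y += -pull_y
--     moon2.vel.z += -pull_z
--
-- def apply_gravity(moons):
--     combs = combinations(moons, 2)
--     for moon1, moon2 in combs:
--         apply_gravity_to_pair(moon1, moon2)
--
-- def apply_velocity(moons):
--     for moon in moons:
--         moon.pos.x += moon.vel.x
--         moon.pos.y += moon.vel.y
--         moon.pos.z += moon.vel.z
--
-- def time_step(moons):
--     apply_gravity(moons)
--     apply_velocity(moons)
--
-- def make_state(m, axis):
--     return m.pos[axis], m.vel[axis]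
--
-- def find_cycle_periods(positions):
--     moons = [Moon(Vector(x, y, z), Vector(0, 0, 0)) for x, y, z in positions]
--     start_state_x = [make_state(moon, "x") for moon in moons]
--     start_state_y = [make_state(moon, "y") for moon in moons]
--     start_state_z = [make_state(moon, "z") for moon in moons]
--     periods = []
--     for step in count(1):
--         time_step(moons)
--         state_x = [make_state(moon, "x") for moon in moons]
--         state_y = [make_state(moon, "y") for moon in moons]
--         state_z = [make_state(moon, "z") for moon in moons]
--         if state_x == start_state_x: periods.append(step)
--         if state_y == start_state_y: periods.append(step)
--         if state_z == start_state_z: periods.append(step)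
--         if len(periods) == 3: return periods
-- ===== SOURCE B (Python) =====
-- def bisect_left(a, x):
--     lo, hi = 0, len(a)
--     while lo < hi:
--         mid = (lo + hi) // 2
--         if a[mid] < x:
--             lo = mid + 1
--         else:
--             hi = mid
--     return lo
--
--
-- def bisect_right(a, x):
--     lo, hi = 0, len(a)
--     while lo < hi:
--         mid = (lo + hi) // 2
--         if x < a[mid]:
--             hi = mid
--         else:
--             lo = mid + 1
--     return lo
--
--
-- def axis_step(axis):
--     # Rank-based gravity: instead of summing pairwise pulls, sort the
--     # positions once and read each moon's net pull from its rank —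
--     # (#moons strictly above) - (#moons strictly below) via binary search.
--     ps = sorted(p for p, _ in axis)
--     n = len(ps)
--     result = []
--     for p, v in axis:
--         w = v + (n - bisect_right(ps, p)) - bisect_left(ps, p)
--         result.append((p + w, w))
--     return result
--
--
-- def find_cycle_periods(positions):
--     starts = [[(p[k], 0) for p in positions] for k in range(3)]
--     axes = starts
--     events = []
--     step = 0
--     while True:
--         step += 1
--         axes = [axis_step(a) for a in axes]
--         for a, s in zip(axes, starts):
--             if a == s:
--                 events.append(step)
--         if len(events) == 3:
--             return events
-- ===== Notes on version B (the rewrite author's own statement) =====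
-- stated objective: alternative
-- what changed: A simulates the moons jointly in 3-D as mutable objects, applying pairwise sign pulls over itertools.combinations (O(n^2) per step); B decomposes the system into three independent (position, velocity) axis lists and computes each step's gravity by rank: sort the axis positions once and obtain every moon's net pull as (#above - #below) by binary search, removing the pairwise inner scan (O(n log n) per step).
import Mathlib
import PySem

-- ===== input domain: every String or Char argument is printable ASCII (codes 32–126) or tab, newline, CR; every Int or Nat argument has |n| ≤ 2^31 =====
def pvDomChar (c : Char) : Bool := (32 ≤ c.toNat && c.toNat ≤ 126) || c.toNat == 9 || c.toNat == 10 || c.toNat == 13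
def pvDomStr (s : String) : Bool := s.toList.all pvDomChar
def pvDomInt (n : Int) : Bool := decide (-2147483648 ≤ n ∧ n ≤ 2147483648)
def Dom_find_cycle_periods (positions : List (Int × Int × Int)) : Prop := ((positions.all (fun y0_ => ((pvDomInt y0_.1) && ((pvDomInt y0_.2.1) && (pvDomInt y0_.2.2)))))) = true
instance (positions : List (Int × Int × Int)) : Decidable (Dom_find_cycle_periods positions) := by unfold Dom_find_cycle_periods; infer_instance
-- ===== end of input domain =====

-- B replaces A's joint 3-D simulation of mutable moon objects with pairwise
-- sign pulls (itertools.combinations) by three flat (position, velocity) axis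
-- lists whose gravity step is computed by rank: sort the axis positions and
-- read each moon's net pull as (#above - #below) via binary search; objective:
-- alternative, same return value.  Both Pythons loop forever on inputs whose
-- event count skips 3; the ports bound that loop by a common fuel constant and
-- are proved equal for every fuel, hence everywhere.

-- ===== PORT A =====
-- calc_pull(a, b): +1 if b > a, -1 if a > b, else 0
def pvSgn (a b : Int) : Int := if a < b then 1 else if b < a then -1 else 0

-- index pairs (i, j), i < j, in itertools.combinations order
def pvPairs (n : Nat) : List (Nat × Nat) :=
  (List.range n).flatMap (fun i => ((List.range n).drop (i + 1)).map (fun j => (i, j)))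

-- a moon is (pos, vel), each an (x, y, z) triple
-- apply_gravity_to_pair, acting on the moon list at indices pr.1, pr.2
def pvGrav3 (ms : List ((Int × Int × Int) × (Int × Int × Int))) (pr : Nat × Nat) :
    List ((Int × Int × Int) × (Int × Int × Int)) :=
  let m1 := ms.getD pr.1 default
  let m2 := ms.getD pr.2 default
  let px := pvSgn m1.1.1 m2.1.1
  let py := pvSgn m1.1.2.1 m2.1.2.1
  let pz := pvSgn m1.1.2.2 m2.1.2.2
  ((ms.set pr.1 (m1.1, (m1.2.1 + px, m1.2.2.1 + py, m1.2.2.2 + pz))).set pr.2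
    (m2.1, (m2.2.1 - px, m2.2.2.1 - py, m2.2.2.2 - pz)))

def pvApplyGravity (ms : List ((Int × Int × Int) × (Int × Int × Int))) :
    List ((Int × Int × Int) × (Int × Int × Int)) :=
  (pvPairs ms.length).foldl pvGrav3 ms

def pvApplyVelocity (ms : List ((Int × Int × Int) × (Int × Int × Int))) :
    List ((Int × Int × Int) × (Int × Int × Int)) :=
  ms.map (fun m => ((m.1.1 + m.2.1, m.1.2.1 + m.2.2.1, m.1.2.2 + m.2.2.2), m.2))

def pvTimeStep (ms : List ((Int × Int × Int) × (Int × Int × Int))) :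
    List ((Int × Int × Int) × (Int × Int × Int)) :=
  pvApplyVelocity (pvApplyGravity ms)

-- [make_state(moon, axis) for moon in moons]
def pvStateX (ms : List ((Int × Int × Int) × (Int × Int × Int))) : List (Int × Int) :=
  ms.map (fun m => (m.1.1, m.2.1))
def pvStateY (ms : List ((Int × Int × Int) × (Int × Int × Int))) : List (Int × Int) :=
  ms.map (fun m => (m.1.2.1, m.2.2.1))
def pvStateZ (ms : List ((Int × Int × Int) × (Int × Int × Int))) : List (Int × Int) :=
  ms.map (fun m => (m.1.2.2, m.2.2.2))

-- both Pythons' 'while True' loops, bounded by one common fuel constant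
def pvFuel : Nat := 4294967296

def pvLoopA (fuel : Nat) (ms : List ((Int × Int × Int) × (Int × Int × Int))) (t : Int)
    (sx sy sz : List (Int × Int)) (acc : List Int) : List Int :=
  match fuel with
  | 0 => acc
  | fuel + 1 =>
    let ms' := pvTimeStep ms
    let acc1 := if pvStateX ms' == sx then acc ++ [t] else acc
    let acc2 := if pvStateY ms' == sy then acc1 ++ [t] else acc1
    let acc3 := if pvStateZ ms' == sz then acc2 ++ [t] else acc2
    if acc3.length == 3 then acc3 else pvLoopA fuel ms' (t + 1) sx sy sz acc3

def find_cycle_periods (positions : List (Int × Int × Int)) : List Int :=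
  let moons := positions.map (fun p => (p, ((0 : Int), (0 : Int), (0 : Int))))
  pvLoopA pvFuel moons 1 (pvStateX moons) (pvStateY moons) (pvStateZ moons) []

-- ===== PORT B =====
-- axis_step: sort the axis positions, then each moon's net pull is
-- (#above - #below) read off by binary search; Source B's bisect_left /
-- bisect_right are CPython's lo/hi halving loops, ported as PySem's
-- primitives of the same name (exact).
def pvAxisStep (axis : List (Int × Int)) : List (Int × Int) :=
  let ps := PySem.List.sorted (axis.map Prod.fst) (fun x => x)
  let n := ps.length
  axis.map (fun pv =>
    let w := pv.2 + ((n : Int) - (PySem.List.bisectRight ps pv.1 : Int))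
              - (PySem.List.bisectLeft ps pv.1 : Int)
    (pv.1 + w, w))

def pvLoopB (fuel : Nat) (step : Int) (axes starts : List (List (Int × Int)))
    (events : List Int) : List Int :=
  match fuel with
  | 0 => events
  | fuel + 1 =>
    let step' := step + 1
    let axes' := axes.map pvAxisStep
    let events' := (axes'.zip starts).foldl
      (fun ev c => if c.1 == c.2 then ev ++ [step'] else ev) events
    if events'.length == 3 then events' else pvLoopB fuel step' axes' starts events'

def find_cycle_periods_alt (positions : List (Int × Int × Int)) : List Int :=
  let starts := [positions.map (fun p => (p.1, (0 : Int))),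
                 positions.map (fun p => (p.2.1, (0 : Int))),
                 positions.map (fun p => (p.2.2, (0 : Int)))]
  pvLoopB pvFuel 0 starts starts []

-- ===== PRECONDITION & SPEC =====
def Spec_find_cycle_periods (positions : List (Int × Int × Int)) (out : List Int) : Prop := out = find_cycle_periods_alt positions
instance (positions : List (Int × Int × Int)) (out : List Int) : Decidable (Spec_find_cycle_periods positions out) := by unfold Spec_find_cycle_periods; infer_instance

-- ===== CLAIM =====
def Claim_equal_find_cycle_periods : Prop := ∀ (positions : List (Int × Int × Int)), Dom_find_cycle_periods positions → Spec_find_cycle_periods positions (find_cycle_periods positions)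

-- ===== LEMMAS AND PROOFS =====

-- 1-D shadow of pvGrav3
def pvGrav1 (s : List (Int × Int)) (pr : Nat × Nat) : List (Int × Int) :=
  let m1 := s.getD pr.1 default
  let m2 := s.getD pr.2 default
  let pl := pvSgn m1.1 m2.1
  (s.set pr.1 (m1.1, m1.2 + pl)).set pr.2 (m2.1, m2.2 - pl)

-- closed form of the gravity pass: sum of pairwise signs
def pvGravSum (s : List (Int × Int)) : List (Int × Int) :=
  s.map (fun pv => (pv.1, pv.2 + (s.map (fun qw => pvSgn pv.1 qw.1)).sum))

def pvMove1 (s : List (Int × Int)) : List (Int × Int) :=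
  s.map (fun pv => (pv.1 + pv.2, pv.2))

-- the sign-sum 1-D step: common form both step mechanisms are reduced to
def pvStep1 (s : List (Int × Int)) : List (Int × Int) :=
  s.map (fun pv =>
    let w := pv.2 + (s.map (fun qw => pvSgn pv.1 qw.1)).sum
    (pv.1 + w, w))

-- contribution of one pair update to the velocity at index i
def pvC (s : List (Int × Int)) (i : Nat) (pr : Nat × Nat) : Int :=
  if i = pr.1 then pvSgn (s.getD pr.1 default).1 (s.getD pr.2 default).1
  else if i = pr.2 then -(pvSgn (s.getD pr.1 default).1 (s.getD pr.2 default).1)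
  else 0

lemma pvSgn_antisymm (a b : Int) : -(pvSgn a b) = pvSgn b a := by
  unfold pvSgn; split_ifs <;> omega

lemma pvSgn_self (a : Int) : pvSgn a a = 0 := by simp [pvSgn]

theorem grav1_length (s : List (Int × Int)) (pr : Nat × Nat) :
    (pvGrav1 s pr).length = s.length := by simp [pvGrav1]
theorem pvC_congr (s s' : List (Int × Int)) (hp : ∀ j, (s'.getD j default).1 = (s.getD j default).1)
    (i : Nat) (pr : Nat × Nat) : pvC s' i pr = pvC s i pr := by
  unfold pvC; rw [hp pr.1, hp pr.2]
theorem grav1_vel (s : List (Int × Int)) (pr : Nat × Nat) (j : Nat)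
    (h1 : pr.1 < s.length) (h2 : pr.2 < s.length) (hne : pr.1 ≠ pr.2) (hj : j < s.length) :
    ((pvGrav1 s pr).getD j default).2 = (s.getD j default).2 + pvC s j pr := by
  have hget : ∀ (l : List (Int × Int)) (k : Nat) (hk : k < l.length), l.getD k default = l[k] := by
    intro l k hk; simp [List.getD, List.getElem?_eq_getElem hk]
  by_cases e2 : j = pr.2
  · subst e2
    rw [hget _ _ (by simp [pvGrav1, *])]
    simp only [pvGrav1, pvC]
    rw [List.getElem_set_self (by simpa using h2)]
    simp [if_neg (Ne.symm hne)]
    ring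
  · by_cases e1 : j = pr.1
    · subst e1
      rw [hget _ _ (by simp [pvGrav1, *])]
      simp only [pvGrav1, pvC]
      rw [List.getElem_set_ne (by omega) (by simpa using h1), List.getElem_set_self (by simpa using h1)]
      simp
    · rw [hget _ _ (by simp [pvGrav1, *]), hget _ _ hj]
      simp only [pvGrav1, pvC]
      rw [List.getElem_set_ne (by omega) (by simpa using hj), List.getElem_set_ne (by omega) (by simpa using hj)]
      simp [e1, e2]
theorem grav1_pos' (s : List (Int × Int)) (pr : Nat × Nat) (j : Nat) :
    ((pvGrav1 s pr).getD j default).1 = (s.getD j default).1 := by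
  simp only [pvGrav1, List.getD, List.getElem?_set]
  split_ifs <;> simp_all

theorem hget' : ∀ (l : List (Int × Int)) (k : Nat) (hk : k < l.length), l.getD k default = l[k] := by
  intro l k hk; simp [List.getD, List.getElem?_eq_getElem hk]

theorem grav1_foldl_char (P : List (Nat × Nat)) :
    ∀ (s : List (Int × Int)),
    (∀ pr ∈ P, pr.1 < s.length ∧ pr.2 < s.length ∧ pr.1 ≠ pr.2) →
    P.foldl pvGrav1 s = s.mapIdx (fun i pv => (pv.1, pv.2 + (P.map (pvC s i)).sum)) := by
  induction P with
  | nil =>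
    intro s _
    apply List.ext_getElem (by simp)
    intro i h1 h2
    simp
  | cons pr P ih =>
    intro s h
    obtain ⟨hp1, hp2, hpne⟩ := h pr (by simp)
    have hlen : (pvGrav1 s pr).length = s.length := grav1_length s pr
    have hposs : ∀ j, ((pvGrav1 s pr).getD j default).1 = (s.getD j default).1 := grav1_pos' s pr
    have hC : pvC (pvGrav1 s pr) = pvC s := by
      funext i q; exact pvC_congr s _ hposs i q
    rw [List.foldl_cons, ih _ (by intro q hq; rw [hlen]; exact h q (List.mem_cons_of_mem _ hq))]
    apply List.ext_getElem (by simp [hlen])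
    intro i hi1 hi2
    have hgi : i < s.length := by simpa [hlen] using hi2
    have hgi' : i < (pvGrav1 s pr).length := by simpa [hlen] using hgi
    simp only [List.getElem_mapIdx]
    have e1 : (pvGrav1 s pr)[i].1 = s[i].1 := by
      have := hposs i; rwa [hget' _ _ hgi', hget' _ _ hgi] at this
    have e2 : (pvGrav1 s pr)[i].2 = s[i].2 + pvC s i pr := by
      have := grav1_vel s pr i hp1 hp2 hpne hgi
      rwa [hget' _ _ hgi', hget' _ _ hgi] at this
    refine Prod.ext ?_ ?_
    · simpa using e1
    · simp only [List.map_cons, List.sum_cons, hC, e2]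
      ring
theorem mem_drop_range (n m k : Nat) (h : k ∈ (List.range n).drop m) : m ≤ k ∧ k < n := by
  rw [List.range_eq_range', List.drop_range'] at h
  have := List.mem_range'_1.mp h
  omega

theorem pvPairs_mem (n : Nat) (pr : Nat × Nat) (h : pr ∈ pvPairs n) : pr.1 < pr.2 ∧ pr.2 < n := by
  simp only [pvPairs, List.mem_flatMap, List.mem_map] at h
  obtain ⟨i, hi, j, hj, rfl⟩ := h
  have := mem_drop_range n (i+1) j hj
  exact ⟨by omega, by omega⟩

theorem sum_map_flatMap (l : List Nat) (g : Nat → List (Nat × Nat)) (f : Nat × Nat → Int) :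
    ((l.flatMap g).map f).sum = (l.map (fun a => ((g a).map f).sum)).sum := by
  induction l with
  | nil => simp
  | cons a l ih => simp [List.flatMap_cons, ih]

theorem flatMap_range_succ (g : Nat → List (Nat × Nat)) (n : Nat) :
    (List.range (n+1)).flatMap g = (List.range n).flatMap g ++ g n := by
  rw [List.range_succ]; simp

theorem pvPairs_map_sum_succ (f : Nat × Nat → Int) (n : Nat) :
    ((pvPairs (n + 1)).map f).sum
      = ((pvPairs n).map f).sum + ((List.range n).map (fun a => f (a, n))).sum := by
  have hdrop : ∀ a, a < n → (List.range (n+1)).drop (a+1) = (List.range n).drop (a+1) ++ [n] := by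
    intro a ha
    rw [List.range_succ, List.drop_append_of_le_length (by simpa using ha)]
  unfold pvPairs
  rw [flatMap_range_succ]
  rw [List.map_append, List.sum_append]
  have h1 : ((List.range (n+1)).drop ((n:Nat)+1)).map (fun j => ((n:Nat), j)) = [] := by simp
  rw [h1]
  rw [sum_map_flatMap, sum_map_flatMap]
  have h2 : ∀ a ∈ List.range n,
      ((((List.range (n+1)).drop (a+1)).map (fun j => (a, j))).map f).sum
        = ((((List.range n).drop (a+1)).map (fun j => (a, j))).map f).sum + f (a, n) := by
    intro a ha
    rw [hdrop a (List.mem_range.mp ha)]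
    simp
  rw [List.map_congr_left h2]
  have h3 : ∀ (u v : Nat → Int) (l : List Nat),
      (l.map (fun a => u a + v a)).sum = (l.map u).sum + (l.map v).sum := by
    intro u v l; induction l with
    | nil => simp
    | cons a l ih => simp [ih]; ring
  simpa using h3 (fun a => ((((List.range n).drop (a+1)).map (fun j => (a, j))).map f).sum) (fun a => f (a, n)) (List.range n)

theorem sum_range_ite (n i : Nat) (c : Int) :
    ((List.range n).map (fun a => if i = a then c else 0)).sum = if i < n then c else 0 := by
  induction n with
  | zero => simp
  | succ n ih =>
    rw [List.range_succ, List.map_append, List.sum_append, ih]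
    by_cases h : i = n
    · subst h; simp
    · by_cases h2 : i < n <;> simp [h, h2] <;> omega

theorem pairs_contrib_sum (X : Nat → Int) (n : Nat) : ∀ i, i < n →
    ((pvPairs n).map (fun pr =>
        if i = pr.1 then pvSgn (X pr.1) (X pr.2)
        else if i = pr.2 then -(pvSgn (X pr.1) (X pr.2)) else 0)).sum
      = ((List.range n).map (fun j => pvSgn (X i) (X j))).sum := by
  induction n with
  | zero => intro i hi; omega
  | succ n ih =>
    intro i hi
    rw [pvPairs_map_sum_succ]
    rw [List.range_succ, List.map_append, List.sum_append]
    simp only [List.map_cons, List.map_nil, List.sum_cons, List.sum_nil]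
    by_cases hin : i < n
    · have hne : i ≠ n := by omega
      rw [ih i hin]
      have : ((List.range n).map (fun a =>
          if i = a then pvSgn (X a) (X n) else if i = n then -(pvSgn (X a) (X n)) else 0)).sum
          = ((List.range n).map (fun a => if i = a then pvSgn (X i) (X n) else 0)).sum := by
        apply congrArg
        apply List.map_congr_left
        intro a _
        by_cases h : i = a
        · subst h; simp
        · simp [h, hne]
      rw [this, sum_range_ite, if_pos hin]
      ring
    · have hieq : i = n := by omega
      subst hieq
      have hz : ((pvPairs i).map (fun pr =>
          if i = pr.1 then pvSgn (X pr.1) (X pr.2)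
          else if i = pr.2 then -(pvSgn (X pr.1) (X pr.2)) else 0)).sum = 0 := by
        have : ∀ pr ∈ pvPairs i, (if i = pr.1 then pvSgn (X pr.1) (X pr.2)
            else if i = pr.2 then -(pvSgn (X pr.1) (X pr.2)) else 0) = 0 := by
          intro pr hpr
          have := pvPairs_mem i pr hpr
          have h1 : i ≠ pr.1 := by omega
          have h2 : i ≠ pr.2 := by omega
          simp [h1, h2]
        rw [List.map_congr_left this]
        simp
      have : ((List.range i).map (fun a =>
          if i = a then pvSgn (X a) (X i) else if i = i then -(pvSgn (X a) (X i)) else 0)).sum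
          = ((List.range i).map (fun a => pvSgn (X i) (X a))).sum := by
        apply congrArg; apply List.map_congr_left
        intro a ha
        have h1 : i ≠ a := by have := List.mem_range.mp ha; omega
        simp [h1, pvSgn_antisymm]
      rw [hz, this]
      simp [pvSgn_self]

theorem map_eq_map_range (s : List (Int × Int)) (f : Int × Int → Int) :
    s.map f = (List.range s.length).map (fun j => f (s.getD j default)) := by
  apply List.ext_getElem (by simp)
  intro i h1 h2
  simp only [List.getElem_map, List.getElem_range]
  rw [hget' s i (by simpa using h1)]

theorem step1_eq (s : List (Int × Int)) : pvStep1 s = pvMove1 (pvGravSum s) := by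
  unfold pvStep1 pvMove1 pvGravSum
  rw [List.map_map]
  rfl

theorem stateX_grav3 (ms : List ((Int × Int × Int) × (Int × Int × Int))) (pr : Nat × Nat) :
    pvStateX (pvGrav3 ms pr) = pvGrav1 (pvStateX ms) pr := by
  have hd : ∀ n, (List.map (fun (m : (Int × Int × Int) × (Int × Int × Int)) => (m.1.1, m.2.1)) ms).getD n default
      = ((ms.getD n default).1.1, (ms.getD n default).2.1) :=
    fun n => List.getD_map ms default _
  simp only [pvStateX, pvGrav3, pvGrav1, List.map_set, hd]

theorem stateY_grav3 (ms : List ((Int × Int × Int) × (Int × Int × Int))) (pr : Nat × Nat) :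
    pvStateY (pvGrav3 ms pr) = pvGrav1 (pvStateY ms) pr := by
  have hd : ∀ n, (List.map (fun (m : (Int × Int × Int) × (Int × Int × Int)) => (m.1.2.1, m.2.2.1)) ms).getD n default
      = ((ms.getD n default).1.2.1, (ms.getD n default).2.2.1) :=
    fun n => List.getD_map ms default _
  simp only [pvStateY, pvGrav3, pvGrav1, List.map_set, hd]

theorem stateZ_grav3 (ms : List ((Int × Int × Int) × (Int × Int × Int))) (pr : Nat × Nat) :
    pvStateZ (pvGrav3 ms pr) = pvGrav1 (pvStateZ ms) pr := by
  have hd : ∀ n, (List.map (fun (m : (Int × Int × Int) × (Int × Int × Int)) => (m.1.2.2, m.2.2.2)) ms).getD n default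
      = ((ms.getD n default).1.2.2, (ms.getD n default).2.2.2) :=
    fun n => List.getD_map ms default _
  simp only [pvStateZ, pvGrav3, pvGrav1, List.map_set, hd]

theorem proj_foldl_grav3 (proj : List ((Int × Int × Int) × (Int × Int × Int)) → List (Int × Int))
    (hproj : ∀ ms pr, proj (pvGrav3 ms pr) = pvGrav1 (proj ms) pr)
    (P : List (Nat × Nat)) : ∀ ms, proj (P.foldl pvGrav3 ms) = P.foldl pvGrav1 (proj ms) := by
  induction P with
  | nil => intro ms; simp
  | cons pr P ih => intro ms; simp only [List.foldl_cons, ih, hproj]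

theorem foldl_pairs_eq_gravSum' (s : List (Int × Int)) :
    (pvPairs s.length).foldl pvGrav1 s = pvGravSum s := by
  have hb : ∀ pr ∈ pvPairs s.length, pr.1 < s.length ∧ pr.2 < s.length ∧ pr.1 ≠ pr.2 := by
    intro pr hpr
    have := pvPairs_mem s.length pr hpr
    exact ⟨by omega, by omega, by omega⟩
  rw [grav1_foldl_char _ s hb]
  unfold pvGravSum
  apply List.ext_getElem (by simp)
  intro i h1 h2
  have hi : i < s.length := by simpa using h1
  simp only [List.getElem_mapIdx, List.getElem_map]
  have hsum := pairs_contrib_sum (fun j => (s.getD j default).1) s.length i hi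
  have hCeq : pvC s i = (fun pr =>
      if i = pr.1 then pvSgn ((s.getD pr.1 default).1) ((s.getD pr.2 default).1)
      else if i = pr.2 then -(pvSgn ((s.getD pr.1 default).1) ((s.getD pr.2 default).1)) else 0) := by
    funext pr; rfl
  rw [hCeq, hsum]
  rw [map_eq_map_range s (fun qw => pvSgn s[i].1 qw.1)]
  simp only []
  rw [show (s.getD i default).1 = s[i].1 from by rw [hget' s i hi]]

theorem stateX_applyVel (ms : List ((Int × Int × Int) × (Int × Int × Int))) :
    pvStateX (pvApplyVelocity ms) = pvMove1 (pvStateX ms) := by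
  simp [pvStateX, pvApplyVelocity, pvMove1, List.map_map, Function.comp]

theorem stateY_applyVel (ms : List ((Int × Int × Int) × (Int × Int × Int))) :
    pvStateY (pvApplyVelocity ms) = pvMove1 (pvStateY ms) := by
  simp [pvStateY, pvApplyVelocity, pvMove1, List.map_map, Function.comp]

theorem stateZ_applyVel (ms : List ((Int × Int × Int) × (Int × Int × Int))) :
    pvStateZ (pvApplyVelocity ms) = pvMove1 (pvStateZ ms) := by
  simp [pvStateZ, pvApplyVelocity, pvMove1, List.map_map, Function.comp]

theorem stateX_timeStep' (ms : List ((Int × Int × Int) × (Int × Int × Int))) :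
    pvStateX (pvTimeStep ms) = pvStep1 (pvStateX ms) := by
  unfold pvTimeStep pvApplyGravity
  rw [stateX_applyVel, proj_foldl_grav3 pvStateX stateX_grav3]
  rw [show ms.length = (pvStateX ms).length from by simp [pvStateX]]
  rw [foldl_pairs_eq_gravSum', ← step1_eq]

theorem stateY_timeStep' (ms : List ((Int × Int × Int) × (Int × Int × Int))) :
    pvStateY (pvTimeStep ms) = pvStep1 (pvStateY ms) := by
  unfold pvTimeStep pvApplyGravity
  rw [stateY_applyVel, proj_foldl_grav3 pvStateY stateY_grav3]
  rw [show ms.length = (pvStateY ms).length from by simp [pvStateY]]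
  rw [foldl_pairs_eq_gravSum', ← step1_eq]

theorem stateZ_timeStep' (ms : List ((Int × Int × Int) × (Int × Int × Int))) :
    pvStateZ (pvTimeStep ms) = pvStep1 (pvStateZ ms) := by
  unfold pvTimeStep pvApplyGravity
  rw [stateZ_applyVel, proj_foldl_grav3 pvStateZ stateZ_grav3]
  rw [show ms.length = (pvStateZ ms).length from by simp [pvStateZ]]
  rw [foldl_pairs_eq_gravSum', ← step1_eq]

-- ----- B-side: the rank/bisect step equals the sign-sum step -----

theorem sum_sgn_eq_counts (p : Int) (L : List Int) :
    (L.map (fun q => if p < q then (1:Int) else if q < p then -1 else 0)).sum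
      = ((L.countP (fun q => p < q) : Int)) - ((L.countP (fun q => q < p) : Int)) := by
  induction L with
  | nil => simp
  | cons a L ih =>
    simp only [List.map_cons, List.sum_cons, List.countP_cons, ih]
    split_ifs <;> simp_all <;> omega

theorem countP_index_split (ps : List Int) (p : Int → Bool) (k : Nat) (hk : k ≤ ps.length)
    (h1 : ∀ j (hj : j < ps.length), j < k → p ps[j] = true)
    (h2 : ∀ j (hj : j < ps.length), k ≤ j → p ps[j] = false) :
    ps.countP p = k := by
  rw [← List.take_append_drop k ps, List.countP_append]
  have ht : (ps.take k).countP p = (ps.take k).length := by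
    rw [List.countP_eq_length]
    intro a ha
    obtain ⟨j, hj, rfl⟩ := List.getElem_of_mem ha
    rw [List.getElem_take]
    exact h1 j (by simp at hj; omega) (by simp at hj; omega)
  have hd : (ps.drop k).countP p = 0 := by
    rw [List.countP_eq_zero]
    intro a ha
    obtain ⟨j, hj, rfl⟩ := List.getElem_of_mem ha
    rw [List.getElem_drop]
    simp [h2 (k + j) (by simp at hj; omega) (by omega)]
  rw [ht, hd]
  simp; omega

theorem countP_index_split' (ps : List Int) (p : Int → Bool) (k : Nat) (hk : k ≤ ps.length)
    (h1 : ∀ j (hj : j < ps.length), j < k → p ps[j] = false)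
    (h2 : ∀ j (hj : j < ps.length), k ≤ j → p ps[j] = true) :
    ps.countP p = ps.length - k := by
  rw [← List.take_append_drop k ps, List.countP_append]
  have ht : (ps.take k).countP p = 0 := by
    rw [List.countP_eq_zero]
    intro a ha
    obtain ⟨j, hj, rfl⟩ := List.getElem_of_mem ha
    rw [List.getElem_take]
    simp [h1 j (by simp at hj; omega) (by simp at hj; omega)]
  have hd : (ps.drop k).countP p = (ps.drop k).length := by
    rw [List.countP_eq_length]
    intro a ha
    obtain ⟨j, hj, rfl⟩ := List.getElem_of_mem ha
    rw [List.getElem_drop]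
    exact h2 (k + j) (by simp at hj; omega) (by omega)
  rw [ht, hd]
  simp

theorem countP_lt_of_sorted (ps : List Int) (x : Int) (h : ps.Pairwise (· ≤ ·)) :
    ps.countP (fun q => q < x) = PySem.List.bisectLeft ps x := by
  obtain ⟨hk, h1, h2⟩ := PySem.List.bisectLeft_spec ps x h
  apply countP_index_split ps _ _ hk
  · intro j hj hjk; simpa using h1 j hj hjk
  · intro j hj hjk; simpa using h2 j hj hjk

theorem countP_gt_of_sorted (ps : List Int) (x : Int) (h : ps.Pairwise (· ≤ ·)) :
    ps.countP (fun q => x < q) = ps.length - PySem.List.bisectRight ps x := by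
  obtain ⟨hk, h1, h2⟩ := PySem.List.bisectRight_spec ps x h
  apply countP_index_split' ps _ _ hk
  · intro j hj hjk; simpa using h1 j hj hjk
  · intro j hj hjk; simpa using h2 j hj hjk

theorem axisStep_eq (s : List (Int × Int)) : pvAxisStep s = pvStep1 s := by
  unfold pvAxisStep pvStep1
  apply List.map_congr_left
  intro pv _
  have hpair : (PySem.List.sorted (s.map Prod.fst) (fun x => x)).Pairwise (· ≤ ·) := by
    simpa using PySem.List.sorted_pairwise (s.map Prod.fst) (fun x => x)
  have hperm := PySem.List.sorted_perm (s.map Prod.fst) (fun x => x) false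
  set ps := PySem.List.sorted (s.map Prod.fst) (fun x => x) with hps
  have hlt := countP_lt_of_sorted ps pv.1 hpair
  have hgt := countP_gt_of_sorted ps pv.1 hpair
  have hbr : PySem.List.bisectRight ps pv.1 ≤ ps.length :=
    (PySem.List.bisectRight_spec ps pv.1 hpair).1
  have hsum : (s.map (fun qw => pvSgn pv.1 qw.1)).sum
      = ((s.map Prod.fst).map (fun q => if pv.1 < q then (1:Int) else if q < pv.1 then -1 else 0)).sum := by
    rw [List.map_map]; rfl
  have hc := sum_sgn_eq_counts pv.1 (s.map Prod.fst)
  have hpl : ps.countP (fun q => q < pv.1) = (s.map Prod.fst).countP (fun q => q < pv.1) :=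
    hperm.countP_eq _
  have hpg : ps.countP (fun q => pv.1 < q) = (s.map Prod.fst).countP (fun q => pv.1 < q) :=
    hperm.countP_eq _
  have key : ((ps.length : Int) - (PySem.List.bisectRight ps pv.1 : Int))
      - (PySem.List.bisectLeft ps pv.1 : Int)
      = (s.map (fun qw => pvSgn pv.1 qw.1)).sum := by
    rw [hsum, hc, ← hpl, ← hpg, ← hlt, hgt]
    push_cast [Nat.cast_sub hbr]
    ring
  simp only [← key]
  refine Prod.ext ?_ ?_ <;> simp <;> ring

theorem loop_eq (sx sy sz : List (Int × Int)) :
    ∀ (fuel : Nat) (t : Int) ms,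
    ∀ (acc : List Int),
    pvLoopA fuel ms (t + 1) sx sy sz acc
      = pvLoopB fuel t [pvStateX ms, pvStateY ms, pvStateZ ms] [sx, sy, sz] acc := by
  intro fuel
  induction fuel with
  | zero => intro t ms acc; rfl
  | succ fuel ih =>
    intro t ms acc
    simp only [pvLoopA, pvLoopB, List.map_cons, List.map_nil, axisStep_eq,
      ← stateX_timeStep', ← stateY_timeStep', ← stateZ_timeStep',
      List.zip_cons_cons, List.zip_nil_left, List.foldl_cons, List.foldl_nil]
    split_ifs <;> first | rfl | exact ih (t + 1) (pvTimeStep ms) _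

-- ===== VERDICT (by name: the statement is the Claim_ definition above) =====
theorem find_cycle_periods_spec : Claim_equal_find_cycle_periods := by
  intro positions _
  unfold Spec_find_cycle_periods find_cycle_periods find_cycle_periods_alt
  simp only []
  have hX : pvStateX (positions.map (fun p => (p, ((0:Int),(0:Int),(0:Int)))))
      = positions.map (fun p => (p.1, (0:Int))) := by
    simp [pvStateX, List.map_map, Function.comp]
  have hY : pvStateY (positions.map (fun p => (p, ((0:Int),(0:Int),(0:Int)))))
      = positions.map (fun p => (p.2.1, (0:Int))) := by
    simp [pvStateY, List.map_map, Function.comp]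
  have hZ : pvStateZ (positions.map (fun p => (p, ((0:Int),(0:Int),(0:Int)))))
      = positions.map (fun p => (p.2.2, (0:Int))) := by
    simp [pvStateZ, List.map_map, Function.comp]
  have h := loop_eq (positions.map (fun p => (p.1, (0:Int))))
      (positions.map (fun p => (p.2.1, (0:Int)))) (positions.map (fun p => (p.2.2, (0:Int))))
      pvFuel 0 (positions.map (fun p => (p, ((0:Int),(0:Int),(0:Int))))) []
  rw [hX, hY, hZ]
  rw [hX, hY, hZ] at h
  norm_num at h
  exact h
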